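-- pv_equiv track=rewrite | github.com/vedantparmar12/Kanban | mcp-server/src/readme_updater.py | _find_badge_section
-- ===== SOURCE A (Python) =====
-- from typing import Dict, List, Optional
--
-- def _find_badge_section(lines: List[str]) -> int:
--     for i, line in enumerate(lines):
--         if line.strip().startswith('![') or line.strip().startswith('[!['):
--             return i
--
--     for i, line in enumerate(lines):
--         if line.startswith('#'):
--             return i + 1
--
--     return -1
-- ===== SOURCE B (Python) =====
-- from typing import List
--
-- def _find_badge_section(lines: List[str]) -> int:
--     first_heading = -1
--     for i, line in enumerate(lines):
--         s = line.strip()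
--         if s.startswith('![') or s.startswith('[!['):
--             return i
--         if line.startswith('#') and first_heading == -1:
--             first_heading = i
--     return first_heading + 1 if first_heading != -1 else -1
-- ===== Notes on version B (the rewrite author's own statement) =====
-- stated objective: alternative
-- what changed: Replaces A's two full passes over the lines (badge scan, then heading scan) with a single pass that early-returns on a badge while remembering the first heading index, resolving after the loop.
import Mathlib
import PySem

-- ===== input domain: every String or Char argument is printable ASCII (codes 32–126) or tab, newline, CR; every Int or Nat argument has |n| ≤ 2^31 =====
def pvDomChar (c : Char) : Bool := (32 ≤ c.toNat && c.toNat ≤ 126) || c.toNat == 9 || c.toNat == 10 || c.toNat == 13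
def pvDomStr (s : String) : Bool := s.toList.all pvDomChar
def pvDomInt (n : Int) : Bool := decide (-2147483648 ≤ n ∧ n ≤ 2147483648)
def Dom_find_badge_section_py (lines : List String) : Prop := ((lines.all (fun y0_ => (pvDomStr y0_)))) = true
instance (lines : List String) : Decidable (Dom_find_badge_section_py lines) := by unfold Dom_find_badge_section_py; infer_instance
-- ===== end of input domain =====

-- B: single pass (early return on badge, remember first heading) instead of A's two passes; return value only.
-- ===== PORT A =====
-- first loop of A: return index of first line whose strip() starts with '![' or '[!['
def pvBadge (line : String) : Bool :=
  PySem.Str.startswith (PySem.Str.strip line) "![" || PySem.Str.startswith (PySem.Str.strip line) "[!["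

def pvLoop1 (lines : List String) (i : Int) : Option Int :=
  match lines with
  | [] => none
  | l :: rest => if pvBadge l then some i else pvLoop1 rest (i + 1)

-- second loop of A: return index of first line starting with '#'
def pvLoop2 (lines : List String) (i : Int) : Option Int :=
  match lines with
  | [] => none
  | l :: rest => if PySem.Str.startswith l "#" then some i else pvLoop2 rest (i + 1)

def find_badge_section_py (lines : List String) : Int :=
  match pvLoop1 lines 0 with
  | some i => i
  | none =>
    match pvLoop2 lines 0 with
    | some i => i + 1
    | none => -1

-- ===== PORT B =====
-- single pass: early return on badge, remember the index of the first heading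
def pvBadgeB (line : String) : Bool :=
  let s := PySem.Str.strip line
  PySem.Str.startswith s "![" || PySem.Str.startswith s "[!["

def pvLoopB (lines : List String) (i first_heading : Int) : Int :=
  match lines with
  | [] => if first_heading != -1 then first_heading + 1 else -1
  | l :: rest =>
    if pvBadgeB l then i
    else if PySem.Str.startswith l "#" && first_heading == -1 then pvLoopB rest (i + 1) i
    else pvLoopB rest (i + 1) first_heading

def find_badge_section_py_alt (lines : List String) : Int :=
  pvLoopB lines 0 (-1)

-- ===== PRECONDITION & SPEC =====
def Spec_find_badge_section_py (lines : List String) (out : Int) : Prop := out = find_badge_section_py_alt lines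
instance (lines : List String) (out : Int) : Decidable (Spec_find_badge_section_py lines out) := by unfold Spec_find_badge_section_py; infer_instance

-- ===== CLAIM (what is proved, stated in full; the proofs are below) =====
def Claim_equal_find_badge_section_py : Prop := ∀ (lines : List String), Dom_find_badge_section_py lines → Spec_find_badge_section_py lines (find_badge_section_py lines)

-- ===== LEMMAS AND PROOFS =====

theorem pvBadgeB_eq (l : String) : pvBadgeB l = pvBadge l := rfl

-- once first_heading ≠ -1, B never updates it: result is badge index or first_heading + 1
theorem pvLoopB_fixed (lines : List String) (i fh : Int) (h : fh ≠ -1) :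
    pvLoopB lines i fh = (match pvLoop1 lines i with | some j => j | none => fh + 1) := by
  induction lines generalizing i with
  | nil => simp only [pvLoopB, pvLoop1]; simp [h]
  | cons l rest ih =>
    simp only [pvLoopB, pvLoop1, pvBadgeB_eq]
    have hfh : (fh == -1) = false := by simp [h]
    obtain hb | hb := Bool.eq_false_or_eq_true (pvBadge l)
    · simp only [hb]; simp
    · simp only [hb, hfh, Bool.false_eq_true, if_false, Bool.and_false, ih]

theorem pvLoopB_none (lines : List String) (i : Int) (hi : 0 ≤ i) :
    pvLoopB lines i (-1) =
      (match pvLoop1 lines i with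
       | some j => j
       | none => match pvLoop2 lines i with | some j => j + 1 | none => -1) := by
  induction lines generalizing i with
  | nil => simp [pvLoopB, pvLoop1, pvLoop2]
  | cons l rest ih =>
    simp only [pvLoopB, pvLoop1, pvLoop2, pvBadgeB_eq]
    obtain hb | hb := Bool.eq_false_or_eq_true (pvBadge l)
    · simp only [hb]; simp
    · obtain hh | hh := Bool.eq_false_or_eq_true (PySem.Str.startswith l "#")
      · have hne : i ≠ -1 := by omega
        simp only [hb, hh, Bool.false_eq_true, if_false, Bool.true_and, beq_self_eq_true, if_true,
          pvLoopB_fixed rest (i + 1) i hne]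
      · simp only [hb, hh, Bool.false_eq_true, if_false, Bool.false_and,
          ih (i + 1) (by omega)]

theorem find_badge_section_py_spec : Claim_equal_find_badge_section_py := by
  intro lines _
  unfold Spec_find_badge_section_py find_badge_section_py find_badge_section_py_alt
  rw [pvLoopB_none lines 0 (by omega)]
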